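-- pv_equiv track=rewrite | github.com/bakunzifiston/Dayare | scripts/sync_i18n_json.py | unescape_php_single
-- ===== SOURCE A (Python) =====
-- def unescape_php_single(raw):
--     # type: (str) -> str
--     out = []  # type: List[str]
--     i = 0
--     while i < len(raw):
--         if raw[i] == "\\" and i + 1 < len(raw) and raw[i + 1] in "'\\":
--             out.append(raw[i + 1])
--             i += 2
--         elif raw[i] == "\\" and i + 1 < len(raw):
--             out.append(raw[i])
--             out.append(raw[i + 1])
--             i += 2
--         else:
--             out.append(raw[i])
--             i += 1
--     return "".join(out)
-- ===== SOURCE B (Python) =====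
-- def unescape_php_single(raw):
--     # type: (str) -> str
--     out = []
--     pending = False  # a backslash has been seen and not yet resolved
--     for ch in raw:
--         if pending:
--             out.append(ch if ch in "'\\" else "\\" + ch)
--             pending = False
--         elif ch == "\\":
--             pending = True
--         else:
--             out.append(ch)
--     if pending:
--         out.append("\\")
--     return "".join(out)
-- ===== Notes on version B (the rewrite author's own statement) =====
-- stated objective: idiomatic
-- what changed: Replaces the index-based while loop with raw[i]/raw[i+1] lookahead and two-character jumps by a single for-each pass over the characters carrying a boolean flag for an unresolved backslash, flushed at the end.
import Mathlib
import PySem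

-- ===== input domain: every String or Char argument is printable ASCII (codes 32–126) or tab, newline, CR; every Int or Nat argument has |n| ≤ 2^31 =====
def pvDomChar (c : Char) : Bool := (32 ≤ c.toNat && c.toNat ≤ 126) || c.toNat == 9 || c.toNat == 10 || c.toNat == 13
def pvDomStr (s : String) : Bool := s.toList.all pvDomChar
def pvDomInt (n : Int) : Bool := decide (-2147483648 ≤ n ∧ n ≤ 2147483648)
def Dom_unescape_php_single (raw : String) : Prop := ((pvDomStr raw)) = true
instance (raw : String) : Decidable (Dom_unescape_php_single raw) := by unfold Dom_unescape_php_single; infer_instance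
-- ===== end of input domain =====

-- B replaces A's index-based while loop (raw[i]/raw[i+1] lookahead, two-char jumps)
-- by a single for-each pass carrying a boolean "unresolved-backslash flag; same values.

-- ===== PORT A =====
-- A's while loop over index i, consuming two characters on a backslash pair,
-- transcribed as the obvious recursion over the remaining characters.
def pvALoop : List Char → List Char
  | [] => []
  | c :: rest =>
    if c = '\\' then
      match rest with
      | d :: rest' =>
        if d = '\'' ∨ d = '\\' then d :: pvALoop rest'          -- real escape: append raw[i+1], i += 2
        else c :: d :: pvALoop rest'                             -- keep both chars, i += 2
      | [] => c :: pvALoop []                                    -- no lookahead: append raw[i], i += 1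
    else c :: pvALoop rest                                       -- ordinary char, i += 1

def unescape_php_single (raw : String) : String :=
  String.ofList (pvALoop raw.toList)

-- ===== PORT B =====
-- B's for-each pass: state = (reversed output, pending-backslash flag), flushed at the end.
def pvBStep (st : List Char × Bool) (ch : Char) : List Char × Bool :=
  if st.2 then
    ((if ch = '\'' ∨ ch = '\\' then [ch] else [ch, '\\']) ++ st.1, false)
  else if ch = '\\' then (st.1, true)
  else (ch :: st.1, false)

def pvFinish (st : List Char × Bool) : List Char :=
  if st.2 then ('\\' :: st.1).reverse else st.1.reverse

def unescape_php_single_alt (raw : String) : String :=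
  String.ofList (pvFinish (raw.toList.foldl pvBStep ([], false)))

-- ===== PRECONDITION & SPEC =====
def Spec_unescape_php_single (raw : String) (out : String) : Prop := out = unescape_php_single_alt raw
instance (raw : String) (out : String) : Decidable (Spec_unescape_php_single raw out) := by unfold Spec_unescape_php_single; infer_instance

-- ===== CLAIM (what is proved, stated in full; the proofs are below) =====
def Claim_equal_unescape_php_single : Prop := ∀ (raw : String), Dom_unescape_php_single raw → Spec_unescape_php_single raw (unescape_php_single raw)

-- ===== LEMMAS AND PROOFS =====
theorem pvKey : ∀ (l : List Char) (acc : List Char),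
    pvFinish (l.foldl pvBStep (acc, false)) = acc.reverse ++ pvALoop l := by
  intro l
  induction l using pvALoop.induct with
  | case1 => intro acc; simp [pvALoop, pvFinish]
  | case2 d rest' hd ih =>
    intro acc
    simp only [List.foldl]
    rw [show pvBStep (acc, false) '\\' = (acc, true) by simp [pvBStep]]
    rw [show pvBStep (acc, true) d = (d :: acc, false) by simp [pvBStep, if_pos hd]]
    rw [ih]
    simp [pvALoop, if_pos hd]
  | case3 d rest' hd ih =>
    intro acc
    simp only [List.foldl]
    rw [show pvBStep (acc, false) '\\' = (acc, true) by simp [pvBStep]]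
    rw [show pvBStep (acc, true) d = (d :: '\\' :: acc, false) by simp [pvBStep, if_neg hd]]
    rw [ih]
    simp [pvALoop, if_neg hd]
  | case4 ih =>
    intro acc
    simp only [List.foldl]
    rw [show pvBStep (acc, false) '\\' = (acc, true) by simp [pvBStep]]
    simp [pvFinish, pvALoop]

  | case5 c rest hc ih =>
    intro acc
    simp only [List.foldl]
    rw [show pvBStep (acc, false) c = (c :: acc, false) by simp [pvBStep, hc]]
    rw [ih]
    conv_rhs => rw [pvALoop.eq_def]
    simp [if_neg hc]

-- ===== VERDICT (by name: the statement is the Claim_ definition above) =====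
theorem unescape_php_single_spec : Claim_equal_unescape_php_single := by
  intro raw _
  unfold Spec_unescape_php_single unescape_php_single unescape_php_single_alt
  rw [pvKey raw.toList []]
  simp
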